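-- pv_equiv track=rewrite | github.com/dam0nl12/384 | A2/kenken_csp.py | div_check
-- ===== SOURCE A (Python) =====
-- import itertools
--
-- def div_check(lst_vals, target_val):
--     for perm in itertools.permutations(lst_vals):
--
--         result = perm[0]
--         i = 1
--
--         while i < len(lst_vals):
--
--             # Use //, not / based on the Piazza post.
--             result //= perm[i]
--             i += 1
--
--         if result == target_val:
--             return True
--
--     return False
-- ===== SOURCE B (Python) =====
-- def div_check(lst_vals, target_val):
--     # Level-by-level search over (current value, multiset of remaining divisors)
--     # states instead of enumerating permutations one by one; equal states merge.
--     srt = sorted(lst_vals)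
--     states = set()
--     for i in range(len(srt)):
--         states.add((srt[i], tuple(srt[:i] + srt[i + 1:])))
--     for _ in range(len(srt) - 1):
--         nxt = set()
--         for (val, rem) in states:
--             for i in range(len(rem)):
--                 nxt.add((val // rem[i], rem[:i] + rem[i + 1:]))
--         states = nxt
--     return any(val == target_val for (val, rem) in states)
-- ===== Notes on version B (the rewrite author's own statement) =====
-- stated objective: alternative
-- what changed: Instead of enumerating all n! permutations and folding floor-division over each, B runs a level-by-level dynamic program over states (current value, sorted tuple of remaining divisors) deduplicated in a set, merging permutations that reach the same intermediate value; it trades the permutation scan for a state-set breadth-first sweep (often far fewer states, but not uniformly faster: A can return early on a lucky first permutation).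
-- outside the precondition, e.g. on div_check([0, 5], 0): A returns True, B raises ZeroDivisionError
import Mathlib
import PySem

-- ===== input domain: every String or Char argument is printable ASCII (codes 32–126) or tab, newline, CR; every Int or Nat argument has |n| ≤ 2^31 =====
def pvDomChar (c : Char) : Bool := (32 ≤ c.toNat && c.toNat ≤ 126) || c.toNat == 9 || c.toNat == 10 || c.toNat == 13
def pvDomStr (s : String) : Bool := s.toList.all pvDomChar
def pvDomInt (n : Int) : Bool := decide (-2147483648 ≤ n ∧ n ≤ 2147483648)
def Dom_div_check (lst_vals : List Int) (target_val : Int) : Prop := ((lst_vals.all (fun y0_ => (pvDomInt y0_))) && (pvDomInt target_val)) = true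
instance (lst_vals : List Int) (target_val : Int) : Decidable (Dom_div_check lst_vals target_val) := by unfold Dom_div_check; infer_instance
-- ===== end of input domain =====

-- B replaces A's scan of all n! permutations by a level-by-level dynamic program over
-- (current value, remaining sorted divisors) states deduplicated in a set, merging
-- permutations that reach the same intermediate value (alternative algorithm).

-- ===== PORT A =====
-- itertools.permutations(lst_vals) is PySem.List.permutations lst_vals lst_vals.length;
-- the while-loop 'result //= perm[i]' for i = 1 .. len-1 is a foldl of floordiv over perm's tail.
-- perm = [] (only for lst_vals = [], where Python raises IndexError on perm[0]) is outside Pre_.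
def div_check (lst_vals : List Int) (target_val : Int) : Bool :=
  (PySem.List.permutations lst_vals lst_vals.length).any fun perm =>
    match perm with
    | [] => false
    | result :: rest =>
        (rest.foldl (fun result v => PySem.Int.floordiv result v) result) == target_val

-- ===== PORT B =====
-- Source B: states = {(srt[i], srt[:i] + srt[i+1:]) for i in range(len(srt))}
-- (the slices srt[:i], srt[i+1:] with 0 ≤ i < len are List.take i / List.drop (i+1))
def altInit (srt : List Int) : PySem.Set (Int × List Int) :=
  (List.range srt.length).foldl
    (fun states i => PySem.Set.add states (srt.getD i 0, srt.take i ++ srt.drop (i + 1)))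
    PySem.Set.empty

-- Source B: nxt = {(val // rem[i], rem[:i] + rem[i+1:]) for (val, rem) in states for i in range(len(rem))}
-- (building a new Set from a set's elements is order-independent)
def altStep (states : PySem.Set (Int × List Int)) : PySem.Set (Int × List Int) :=
  states.foldl
    (fun nxt vr =>
      (List.range vr.2.length).foldl
        (fun nxt i =>
          PySem.Set.add nxt
            (PySem.Int.floordiv vr.1 (vr.2.getD i 0), vr.2.take i ++ vr.2.drop (i + 1)))
        nxt)
    PySem.Set.empty

def div_check_alt (lst_vals : List Int) (target_val : Int) : Bool :=
  let srt := PySem.List.sorted lst_vals (fun x => x) false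
  let states := (List.range (srt.length - 1)).foldl (fun s _ => altStep s) (altInit srt)
  states.any (fun vr => vr.1 == target_val)

-- ===== PRECONDITION & SPEC =====
-- Pre_ excludes the empty list, on which A raises IndexError (perm[0]), and lists of
-- length ≥ 2 containing 0, on which A raises ZeroDivisionError except when an earlier
-- permutation in itertools order already hits target_val — an artefact of enumeration
-- order that B's deduplicated search does not share (B raises there too, in its own order).
def Pre_div_check (lst_vals : List Int) (target_val : Int) : Prop :=
  lst_vals ≠ [] ∧ (lst_vals.length = 1 ∨ (0 : Int) ∉ lst_vals)
instance (lst_vals : List Int) (target_val : Int) : Decidable (Pre_div_check lst_vals target_val) := by unfold Pre_div_check; infer_instance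

def pvWitness_div_check : List Int × Int := ([12, 3, 2], 2)

def Spec_div_check (lst_vals : List Int) (target_val : Int) (out : Bool) : Prop := out = div_check_alt lst_vals target_val
instance (lst_vals : List Int) (target_val : Int) (out : Bool) : Decidable (Spec_div_check lst_vals target_val out) := by unfold Spec_div_check; infer_instance

-- ===== CLAIM (what is proved, stated in full; the proofs are below) =====
def Claim_equal_div_check : Prop := ∀ (lst_vals : List Int) (target_val : Int), Dom_div_check lst_vals target_val → Pre_div_check lst_vals target_val → Spec_div_check lst_vals target_val (div_check lst_vals target_val)

-- ===== LEMMAS AND PROOFS =====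

-- membership in a foldl of Set.add's
theorem pv_mem_foldl_add {α β : Type} [BEq α] [LawfulBEq α] (f : β → α) (l : List β)
    (s0 : PySem.Set α) (x : α) :
    x ∈ l.foldl (fun s b => PySem.Set.add s (f b)) s0 ↔ x ∈ s0 ∨ ∃ b ∈ l, x = f b := by
  induction l generalizing s0 with
  | nil => simp
  | cons b l ih =>
    simp only [List.foldl_cons, ih, PySem.Set.mem_add, List.mem_cons]
    constructor
    · rintro ((h | h) | ⟨b', hb', rfl⟩)
      · exact Or.inl h
      · exact Or.inr ⟨b, Or.inl rfl, h⟩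
      · exact Or.inr ⟨b', Or.inr hb', rfl⟩
    · rintro (h | ⟨b', (rfl | hb'), rfl⟩)
      · exact Or.inl (Or.inl h)
      · exact Or.inl (Or.inr rfl)
      · exact Or.inr ⟨b', hb', rfl⟩

-- membership in a nested foldl of Set.add's
theorem pv_mem_foldl_foldl_add {α β : Type} [BEq α] [LawfulBEq α] (g : β → List Nat)
    (f : β → Nat → α) (l : List β) (s0 : PySem.Set α) (x : α) :
    x ∈ l.foldl (fun s vr => (g vr).foldl (fun s i => PySem.Set.add s (f vr i)) s) s0 ↔
      x ∈ s0 ∨ ∃ vr ∈ l, ∃ i ∈ g vr, x = f vr i := by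
  induction l generalizing s0 with
  | nil => simp
  | cons b l ih =>
    simp only [List.foldl_cons, ih, pv_mem_foldl_add, List.mem_cons]
    constructor
    · rintro ((h | h) | ⟨b', hb', h⟩)
      · exact Or.inl h
      · exact Or.inr ⟨b, Or.inl rfl, h⟩
      · exact Or.inr ⟨b', Or.inr hb', h⟩
    · rintro (h | ⟨b', (rfl | hb'), h⟩)
      · exact Or.inl (Or.inl h)
      · exact Or.inl (Or.inr h)
      · exact Or.inr ⟨b', hb', h⟩

theorem pv_mem_altInit (srt : List Int) (x : Int × List Int) :
    x ∈ altInit srt ↔ ∃ i : Nat, ∃ h : i < srt.length, x = (srt[i], srt.eraseIdx i) := by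
  unfold altInit
  rw [pv_mem_foldl_add (fun i => (srt.getD i 0, srt.take i ++ srt.drop (i + 1)))]
  simp only [PySem.Set.empty, List.not_mem_nil, false_or, List.mem_range]
  constructor
  · rintro ⟨i, hi, rfl⟩
    exact ⟨i, hi, by rw [List.getD_eq_getElem _ _ hi, ← List.eraseIdx_eq_take_drop_succ]⟩
  · rintro ⟨i, hi, rfl⟩
    exact ⟨i, hi, by rw [List.getD_eq_getElem _ _ hi, ← List.eraseIdx_eq_take_drop_succ]⟩

theorem pv_mem_altStep (S : PySem.Set (Int × List Int)) (x : Int × List Int) :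
    x ∈ altStep S ↔ ∃ vr ∈ S, ∃ i : Nat, ∃ h : i < vr.2.length,
      x = (PySem.Int.floordiv vr.1 vr.2[i], vr.2.eraseIdx i) := by
  have h := pv_mem_foldl_foldl_add (fun vr : Int × List Int => List.range vr.2.length)
    (fun vr i => (PySem.Int.floordiv vr.1 (vr.2.getD i 0), vr.2.take i ++ vr.2.drop (i + 1)))
    S PySem.Set.empty x
  unfold altStep
  rw [h]
  simp only [PySem.Set.empty, List.not_mem_nil, false_or, List.mem_range]
  constructor
  · rintro ⟨vr, hvr, i, hi, rfl⟩
    exact ⟨vr, hvr, i, hi, by rw [List.getD_eq_getElem _ _ hi, ← List.eraseIdx_eq_take_drop_succ]⟩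
  · rintro ⟨vr, hvr, i, hi, rfl⟩
    exact ⟨vr, hvr, i, hi, by rw [List.getD_eq_getElem _ _ hi, ← List.eraseIdx_eq_take_drop_succ]⟩

def pvIter (srt : List Int) (k : Nat) : PySem.Set (Int × List Int) :=
  (List.range k).foldl (fun s _ => altStep s) (altInit srt)

theorem pvIter_succ (srt : List Int) (k : Nat) :
    pvIter srt (k + 1) = altStep (pvIter srt k) := by
  unfold pvIter
  rw [List.range_succ, List.foldl_append]
  rfl

-- the DP invariant: a state (v, rem) is in level k iff rem is sorted and some
-- (k+1)-element prefix of a permutation of srt folds to v with remainder rem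
theorem pv_iter_mem (srt : List Int) (hs : srt.Pairwise (· ≤ ·)) (k : Nat) (v : Int)
    (rem : List Int) :
    (v, rem) ∈ pvIter srt k ↔
      rem.Pairwise (· ≤ ·) ∧ ∃ (r : Int) (rest : List Int), rest.length = k ∧
        (r :: (rest ++ rem)).Perm srt ∧
        v = rest.foldl (fun result w => PySem.Int.floordiv result w) r := by
  induction k generalizing v rem with
  | zero =>
    rw [show pvIter srt 0 = altInit srt from rfl, pv_mem_altInit]
    constructor
    · rintro ⟨i, hi, hx⟩
      rw [Prod.mk.injEq] at hx
      obtain ⟨rfl, rfl⟩ := hx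
      refine ⟨List.Pairwise.sublist (List.eraseIdx_sublist srt i) hs, srt[i], [], rfl, ?_, rfl⟩
      simpa using List.getElem_cons_eraseIdx_perm hi
    · rintro ⟨hrem, r, rest, hlen, hperm, hv⟩
      have hrest : rest = [] := List.eq_nil_of_length_eq_zero hlen
      subst hrest
      simp only [List.nil_append, List.foldl_nil] at hperm hv
      subst hv
      have hr : v ∈ srt := hperm.subset List.mem_cons_self
      obtain ⟨i, hi, hvi⟩ := List.getElem_of_mem hr
      refine ⟨i, hi, ?_⟩
      rw [Prod.mk.injEq]
      refine ⟨hvi.symm, ?_⟩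
      have h1 : rem.Perm (srt.eraseIdx i) := by
        have h2 : (v :: rem).Perm (v :: srt.eraseIdx i) := by
          refine hperm.trans ?_
          rw [← hvi]
          exact (List.getElem_cons_eraseIdx_perm hi).symm
        exact (List.perm_cons v).mp h2
      exact h1.eq_of_pairwise (fun a b _ _ h h' => le_antisymm h h') hrem
        (List.Pairwise.sublist (List.eraseIdx_sublist srt i) hs)
  | succ k ih =>
    rw [pvIter_succ, pv_mem_altStep]
    constructor
    · rintro ⟨⟨v0, rem0⟩, hvr, i, hi, hx⟩
      rw [Prod.mk.injEq] at hx
      obtain ⟨rfl, rfl⟩ := hx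
      obtain ⟨hrem0, r, rest, hlen, hperm, hv0⟩ := (ih v0 rem0).mp hvr
      refine ⟨List.Pairwise.sublist (List.eraseIdx_sublist rem0 i) hrem0, r,
        rest ++ [rem0[i]], by simp [hlen], ?_, ?_⟩
      · refine List.Perm.trans ?_ hperm
        refine List.Perm.cons r ?_
        have h1 : (rem0[i] :: rem0.eraseIdx i).Perm rem0 := List.getElem_cons_eraseIdx_perm hi
        have h2 : rest ++ [rem0[i]] ++ rem0.eraseIdx i = rest ++ (rem0[i] :: rem0.eraseIdx i) := by
          simp
        rw [h2]
        exact List.Perm.append_left rest h1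
      · simp [List.foldl_append, hv0]
    · rintro ⟨hrem, r, rest, hlen, hperm, hv⟩
      rcases List.eq_nil_or_concat rest with rfl | ⟨rest0, a, rfl⟩
      · simp at hlen
      simp only [List.concat_eq_append] at hlen hperm hv
      have hlen0 : rest0.length = k := by simpa using hlen
      have hperm0 : (PySem.List.sorted (a :: rem) (fun x => x) false).Perm (a :: rem) :=
        PySem.List.sorted_perm _ _ _
      set rem0 := PySem.List.sorted (a :: rem) (fun x => x) false with hrem0def
      have hsort0 : rem0.Pairwise (· ≤ ·) := by
        simpa using PySem.List.sorted_pairwise (a :: rem) (fun x => x)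
      have hmem0 : (rest0.foldl (fun result w => PySem.Int.floordiv result w) r, rem0)
          ∈ pvIter srt k := by
        rw [ih]
        refine ⟨hsort0, r, rest0, hlen0, ?_, rfl⟩
        refine List.Perm.trans ?_ hperm
        refine List.Perm.cons r ?_
        have h2 : rest0 ++ [a] ++ rem = rest0 ++ (a :: rem) := by simp
        rw [h2]
        exact List.Perm.append_left rest0 hperm0
      have ha : a ∈ rem0 := hperm0.symm.subset List.mem_cons_self
      obtain ⟨i, hi, hai⟩ := List.getElem_of_mem ha
      refine ⟨_, hmem0, i, hi, ?_⟩
      rw [Prod.mk.injEq]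
      constructor
      · rw [hai, hv, List.foldl_append, List.foldl_cons, List.foldl_nil]
      · have h1 : (rem0.eraseIdx i).Perm rem := by
          have h2 : (a :: rem0.eraseIdx i).Perm (a :: rem) := by
            refine List.Perm.trans ?_ hperm0
            rw [← hai]
            exact List.getElem_cons_eraseIdx_perm hi
          exact (List.perm_cons a).mp h2
        exact (h1.eq_of_pairwise (fun a b _ _ h h' => le_antisymm h h')
          (List.Pairwise.sublist (List.eraseIdx_sublist rem0 i) hsort0) hrem).symm

-- every permutation of xs is produced by PySem.List.permutations xs xs.length
theorem pv_perm_mem_permutations : ∀ (p xs : List Int), p.Perm xs →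
    p ∈ PySem.List.permutations xs xs.length := by
  intro p
  induction p with
  | nil =>
    intro xs h
    obtain rfl : xs = [] := h.symm.eq_nil
    simp
  | cons a p ih =>
    intro xs h
    have ha : a ∈ xs := h.subset List.mem_cons_self
    obtain ⟨i, hi, hxi⟩ := List.getElem_of_mem ha
    have hlen : xs.length = p.length + 1 := by simpa using h.length_eq.symm
    have hp : p.Perm (xs.eraseIdx i) := by
      have h2 : (a :: p).Perm (a :: xs.eraseIdx i) := by
        refine h.trans ?_
        rw [← hxi]
        exact (List.getElem_cons_eraseIdx_perm hi).symm
      exact (List.perm_cons a).mp h2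
    rw [hlen, PySem.List.permutations.eq_def]
    refine List.mem_flatMap.mpr ⟨i, List.mem_range.mpr hi, ?_⟩
    rw [List.getElem?_eq_getElem hi, hxi]
    refine List.mem_map.mpr ⟨p, ?_, rfl⟩
    have hel : (xs.eraseIdx i).length = p.length := by
      rw [List.length_eraseIdx_of_lt hi, hlen]
      omega
    rw [← hel]
    exact ih (xs.eraseIdx i) hp

theorem div_check_spec : Claim_equal_div_check := by
  intro lst tv _ hpre
  obtain ⟨hne, -⟩ := hpre
  unfold Spec_div_check div_check div_check_alt
  have hsp : (PySem.List.sorted lst (fun x => x) false).Perm lst := PySem.List.sorted_perm _ _ _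
  have hss : (PySem.List.sorted lst (fun x => x) false).Pairwise (· ≤ ·) := by
    simpa using PySem.List.sorted_pairwise lst (fun x => x)
  set srt := PySem.List.sorted lst (fun x => x) false with hsrtdef
  have hslen : srt.length = lst.length := hsp.length_eq
  have hlpos : 0 < lst.length := List.length_pos_of_ne_nil hne
  rw [Bool.eq_iff_iff, List.any_eq_true, List.any_eq_true]
  constructor
  · rintro ⟨perm, hmem, hf⟩
    have hpl : perm.Perm lst := PySem.List.perm_of_mem_permutations hmem
    match perm, hpl, hf with
    | [], hpl, hf =>
      have : lst = [] := hpl.symm.eq_nil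
      exact absurd this hne
    | r :: rest, hpl, hf =>
      have hfold : rest.foldl (fun result v => PySem.Int.floordiv result v) r = tv :=
        beq_iff_eq.mp hf
      refine ⟨(tv, []), ?_, beq_self_eq_true tv⟩
      show (tv, ([] : List Int)) ∈ pvIter srt (srt.length - 1)
      rw [pv_iter_mem srt hss]
      refine ⟨List.Pairwise.nil, r, rest, ?_, ?_, hfold.symm⟩
      · have := hpl.length_eq
        simp only [List.length_cons] at this
        omega
      · simpa using hpl.trans hsp.symm
  · rintro ⟨⟨v, rem⟩, hmem, hf⟩
    have hv : v = tv := beq_iff_eq.mp hf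
    subst hv
    have hmem' := (pv_iter_mem srt hss (srt.length - 1) v rem).mp hmem
    obtain ⟨hrem, r, rest, hlen, hperm, hfold⟩ := hmem'
    have hlens := hperm.length_eq
    simp only [List.length_cons, List.length_append] at hlens
    have hremnil : rem = [] := by
      apply List.eq_nil_of_length_eq_zero
      omega
    subst hremnil
    simp only [List.append_nil] at hperm
    refine ⟨r :: rest, ?_, ?_⟩
    · exact pv_perm_mem_permutations (r :: rest) lst (hperm.trans hsp)
    · simpa using hfold.symm
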